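-- pv_equiv track=rewrite | github.com/pango111/function1 | models/skill_explainer.py | _parse_skill_explanations
-- ===== SOURCE A (Python) =====
-- from typing import List, Dict, Optional
--
-- def _parse_skill_explanations(explanation_text: str, original_skills: List[str]) -> Dict[str, str]:
--     """Parse the AI response into individual skill explanations"""
--     explanations = {}
--
--     # Split by lines and look for skill explanations
--     lines = explanation_text.split('\n')
--     current_skill = None
--     current_explanation = []
--
--     for line in lines:
--         line = line.strip()
--         if not line:
--             continue
--
--         # Check if this line starts a new skill explanation
--         if line.startswith('**') and line.endswith('**:') or ':' in line:
--             # Save previous skill if exists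
--             if current_skill and current_explanation:
--                 explanations[current_skill] = ' '.join(current_explanation).strip()
--
--             # Extract skill name
--             if line.startswith('**'):
--                 current_skill = line.replace('**', '').replace(':', '').strip().lower()
--             else:
--                 current_skill = line.split(':')[0].strip().lower()
--
--             # Get explanation part
--             if ':' in line:
--                 explanation_part = line.split(':', 1)[1].strip()
--                 current_explanation = [explanation_part] if explanation_part else []
--             else:
--                 current_explanation = []
--         else:
--             # Continue current explanation
--             if current_skill:
--                 current_explanation.append(line)
--
--     # Don't forget the last skill
--     if current_skill and current_explanation:
--         explanations[current_skill] = ' '.join(current_explanation).strip()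
--
--     # Match explanations to original skills (case-insensitive)
--     matched_explanations = {}
--     for original_skill in original_skills:
--         skill_lower = original_skill.lower()
--
--         # Direct match
--         if skill_lower in explanations:
--             matched_explanations[original_skill] = explanations[skill_lower]
--         else:
--             # Partial match
--             for explained_skill, explanation in explanations.items():
--                 if skill_lower in explained_skill or explained_skill in skill_lower:
--                     matched_explanations[original_skill] = explanation
--                     break
--             else:
--                 # No match found, create basic explanation
--                 matched_explanations[original_skill] = f"{original_skill} is a technology/skill required for this position. Students should research and learn about this technology to meet job requirements."
--
--     return matched_explanations
-- ===== SOURCE B (Python) =====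
-- def _parse_skill_explanations(explanation_text, original_skills):
--     """Span-based block parser: cut the cleaned lines into header-led blocks with a
--     take/drop splitter, then one scan per skill records exact and partial match together."""
--     lines = [s for s in (raw.strip() for raw in explanation_text.split('\n')) if s]
--
--     def span_body(ls):
--         """(leading non-header lines, rest starting at the first header line)"""
--         for i, l in enumerate(ls):
--             if ':' in l:
--                 return ls[:i], ls[i:]
--         return ls, []
--
--     def sections(ls):
--         out = []
--         while ls:
--             head, ls = ls[0], ls[1:]
--             if ':' not in head:
--                 continue
--             if head.startswith('**'):
--                 name = head.replace('**', '').replace(':', '').strip().lower()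
--             else:
--                 name = head.split(':')[0].strip().lower()
--             inline = head.split(':', 1)[1].strip()
--             body, ls = span_body(ls)
--             out.append((name, ([inline] if inline else []) + body))
--         return out
--
--     explanations = {}
--     for name, body in sections(lines):
--         if name and body:
--             explanations[name] = ' '.join(body).strip()
--     items = list(explanations.items())
--
--     def resolve(skill):
--         sl = skill.lower()
--         exact = partial = None
--         for n, e in items:
--             if exact is None and n == sl:
--                 exact = e
--             if partial is None and (sl in n or n in sl):
--                 partial = e
--         first = exact if exact is not None else partial
--         if first is not None:
--             return first
--         return f"{skill} is a technology/skill required for this position. Students should research and learn about this technology to meet job requirements."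
--
--     return {skill: resolve(skill) for skill in original_skills}
-- ===== Notes on version B (the rewrite author's own statement) =====
-- stated objective: alternative
-- what changed: The line-by-line state machine (dict + current_skill + current_explanation with a duplicated flush snippet) is replaced by a take/drop span splitter that cuts the pre-cleaned lines into whole header-led blocks, and the exact-then-rescan matching is replaced by one simultaneous scan of the items that records the exact and the first partial match together.
import Mathlib
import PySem

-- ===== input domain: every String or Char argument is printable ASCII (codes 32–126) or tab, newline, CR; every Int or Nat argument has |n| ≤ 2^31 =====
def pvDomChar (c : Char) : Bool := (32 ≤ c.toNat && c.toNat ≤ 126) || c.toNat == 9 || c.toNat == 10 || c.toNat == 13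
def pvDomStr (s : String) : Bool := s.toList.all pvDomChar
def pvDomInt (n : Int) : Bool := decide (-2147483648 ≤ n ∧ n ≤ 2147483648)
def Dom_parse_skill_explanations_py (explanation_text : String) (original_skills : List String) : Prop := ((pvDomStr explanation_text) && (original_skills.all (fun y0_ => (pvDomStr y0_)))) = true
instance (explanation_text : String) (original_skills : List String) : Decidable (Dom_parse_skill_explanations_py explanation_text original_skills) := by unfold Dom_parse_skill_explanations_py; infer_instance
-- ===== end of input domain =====

-- B replaces A's line-by-line state machine (dict + current_skill + current_explanation with a
-- duplicated flush snippet) by a take/drop span splitter cutting the cleaned lines into whole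
-- header-led blocks, and the exact-then-rescan matching by one simultaneous scan recording the
-- exact and the first partial match together; objective: alternative decomposition, same values.

-- ===== PORT A =====
-- A's twice-repeated "save previous skill" snippet (current_skill is Python-truthy iff `some s` with s ≠ "")
def pvA_save (d : PySem.Dict String String) (cur : Option String) (body : List String) : PySem.Dict String String :=
  match cur with
  | some s => if s ≠ "" ∧ body ≠ [] then d.insert s (PySem.Str.strip (PySem.Str.join " " body)) else d
  | none => d

-- A's `for line in lines` loop over the state (explanations, current_skill, current_explanation)
def pvA_loop : List String → PySem.Dict String String → Option String → List String →
    PySem.Dict String String × Option String × List String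
  | [], d, cur, body => (d, cur, body)
  | l :: rest, d, cur, body =>
    let line := PySem.Str.strip l
    if line = "" then pvA_loop rest d cur body
    else if (PySem.Str.startswith line "**" && PySem.Str.endswith line "**:") || PySem.Str.isIn ":" line then
      let d' := pvA_save d cur body
      let skill := if PySem.Str.startswith line "**" then
          PySem.Str.lower (PySem.Str.strip (PySem.Str.replace (PySem.Str.replace line "**" "") ":" ""))
        else PySem.Str.lower (PySem.Str.strip (((PySem.Str.split? line ":").getD []).headD ""))
      -- line.split(':', 1)[1]: the split list always has a second piece when ':' ∈ line
      let expl := if PySem.Str.isIn ":" line then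
          let part := PySem.Str.strip (((PySem.Str.splitMax? line ":" 1).getD []).getD 1 "")
          if part ≠ "" then [part] else []
        else []
      pvA_loop rest d' (some skill) expl
    else
      match cur with
      | some s => if s ≠ "" then pvA_loop rest d cur (body ++ [line]) else pvA_loop rest d cur body
      | none => pvA_loop rest d cur body

def parse_skill_explanations_py (explanation_text : String) (original_skills : List String) : List (String × String) :=
  let st := pvA_loop ((PySem.Str.split? explanation_text "\n").getD []) PySem.Dict.empty none []
  let explanations := pvA_save st.1 st.2.1 st.2.2
  (original_skills.foldl (fun m orig =>
    let sl := PySem.Str.lower orig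
    match explanations.get? sl with
    | some e => m.insert orig e
    | none =>
      -- inner for/break over explanations.items, with the for-else default
      match explanations.items.find? (fun p => PySem.Str.isIn sl p.1 || PySem.Str.isIn p.1 sl) with
      | some p => m.insert orig p.2
      | none => m.insert orig (orig ++ " is a technology/skill required for this position. Students should research and learn about this technology to meet job requirements.")
    ) PySem.Dict.empty).items

-- ===== PORT B =====
-- Source B's span_body: (leading non-header lines, rest starting at the first header line)
def pvB_span : List String → List String × List String
  | [] => ([], [])
  | l :: rest =>
    if PySem.Str.isIn ":" l then ([], l :: rest)
    else
      let p := pvB_span rest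
      (l :: p.1, p.2)

-- needed by pvB_sections' termination
theorem pvB_span_snd_le (ls : List String) : (pvB_span ls).2.length ≤ ls.length := by
  induction ls with
  | nil => simp [pvB_span]
  | cons l rest ih =>
    rw [pvB_span]
    split
    · simp
    · simpa using Nat.le_succ_of_le ih

-- Source B's sections while-loop: pop a line; on a header, cut the whole body block with span_body
def pvB_sections : List String → List (String × List String)
  | [] => []
  | head :: rest =>
    if PySem.Str.isIn ":" head then
      let name := if PySem.Str.startswith head "**" then
          PySem.Str.lower (PySem.Str.strip (PySem.Str.replace (PySem.Str.replace head "**" "") ":" ""))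
        else PySem.Str.lower (PySem.Str.strip (((PySem.Str.split? head ":").getD []).headD ""))
      let inline := PySem.Str.strip (((PySem.Str.splitMax? head ":" 1).getD []).getD 1 "")
      let p := pvB_span rest
      (name, (if inline ≠ "" then [inline] else []) ++ p.1) :: pvB_sections p.2
    else pvB_sections rest
termination_by ls => ls.length
decreasing_by
  · have := pvB_span_snd_le rest; simp; omega
  · simp

-- the dict build over the sections (only named sections with a non-empty body; later names overwrite)
def pvB_build (secs : List (String × List String)) : PySem.Dict String String :=
  secs.foldl (fun d p => if p.1 ≠ "" ∧ p.2 ≠ [] then d.insert p.1 (PySem.Str.strip (PySem.Str.join " " p.2)) else d) PySem.Dict.empty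

-- Source B's resolve loop: one scan recording (exact, first partial) together
def pvB_scan (items : List (String × String)) (sl : String) : Option String × Option String :=
  items.foldl (fun st p =>
    ((if st.1 = none ∧ p.1 = sl then some p.2 else st.1),
     (if st.2 = none ∧ (PySem.Str.isIn sl p.1 || PySem.Str.isIn p.1 sl) then some p.2 else st.2))) (none, none)

def pvB_resolve (items : List (String × String)) (skill : String) : String :=
  let st := pvB_scan items (PySem.Str.lower skill)
  match st.1.or st.2 with
  | some e => e
  | none => skill ++ " is a technology/skill required for this position. Students should research and learn about this technology to meet job requirements."

def parse_skill_explanations_py_alt (explanation_text : String) (original_skills : List String) : List (String × String) :=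
  let lines := (((PySem.Str.split? explanation_text "\n").getD []).map PySem.Str.strip).filter (fun s => s ≠ "")
  let items := (pvB_build (pvB_sections lines)).items
  (PySem.Dict.ofList (original_skills.map (fun s => (s, pvB_resolve items s)))).items

-- ===== PRECONDITION & SPEC =====
def Spec_parse_skill_explanations_py (explanation_text : String) (original_skills : List String) (out : List (String × String)) : Prop := out = parse_skill_explanations_py_alt explanation_text original_skills
instance (explanation_text : String) (original_skills : List String) (out : List (String × String)) : Decidable (Spec_parse_skill_explanations_py explanation_text original_skills out) := by unfold Spec_parse_skill_explanations_py; infer_instance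

-- ===== CLAIM (what is proved, stated in full; the proofs are below) =====
def Claim_equal_parse_skill_explanations_py : Prop := ∀ (explanation_text : String) (original_skills : List String), Dom_parse_skill_explanations_py explanation_text original_skills → Spec_parse_skill_explanations_py explanation_text original_skills (parse_skill_explanations_py explanation_text original_skills)

-- ===== LEMMAS AND PROOFS =====

-- inside a header line, a '**…**:' suffix guarantees ':' ∈ line: A's header test collapses to B's
theorem pv_endswith_isIn (s : String) (h : PySem.Str.endswith s "**:" = true) : PySem.Str.isIn ":" s = true := by
  rw [PySem.Str.isIn_iff_infix]
  have h2 := (PySem.Chars.endswith_iff s.toList "**:".toList).mp (by simpa using h)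
  have h3 : (":".toList : List Char) <:+ s.toList := List.IsSuffix.trans ⟨['*','*'], rfl⟩ h2
  exact h3.isInfix

-- A's loop re-expressed on the pre-cleaned lines (each line already stripped and non-empty)
def pvA_loop' : List String → PySem.Dict String String → Option String → List String →
    PySem.Dict String String × Option String × List String
  | [], d, cur, body => (d, cur, body)
  | line :: rest, d, cur, body =>
    if (PySem.Str.startswith line "**" && PySem.Str.endswith line "**:") || PySem.Str.isIn ":" line then
      let d' := pvA_save d cur body
      let skill := if PySem.Str.startswith line "**" then
          PySem.Str.lower (PySem.Str.strip (PySem.Str.replace (PySem.Str.replace line "**" "") ":" ""))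
        else PySem.Str.lower (PySem.Str.strip (((PySem.Str.split? line ":").getD []).headD ""))
      let expl := if PySem.Str.isIn ":" line then
          let part := PySem.Str.strip (((PySem.Str.splitMax? line ":" 1).getD []).getD 1 "")
          if part ≠ "" then [part] else []
        else []
      pvA_loop' rest d' (some skill) expl
    else
      match cur with
      | some s => if s ≠ "" then pvA_loop' rest d cur (body ++ [line]) else pvA_loop' rest d cur body
      | none => pvA_loop' rest d cur body

theorem pvA_loop_clean (ls : List String) : ∀ (d : PySem.Dict String String) cur body,
    pvA_loop ls d cur body = pvA_loop' ((ls.map PySem.Str.strip).filter (fun s => s ≠ "")) d cur body := by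
  induction ls with
  | nil => intro d cur body; rfl
  | cons l rest ih =>
    intro d cur body
    by_cases he : PySem.Str.strip l = ""
    · simp only [pvA_loop, he, List.map_cons, List.filter_cons]
      simp [ih]
    · simp only [pvA_loop, List.map_cons, List.filter_cons]
      rw [if_neg he]
      have : (decide ¬(PySem.Str.strip l = "")) = true := by simp [he]
      simp only [this, if_true]
      simp only [pvA_loop']
      split
      · exact ih _ _ _
      · cases cur with
        | none => exact ih _ _ _
        | some s => by_cases hs : s = "" <;> simp [hs, ih]

def pvStep (d : PySem.Dict String String) (p : String × List String) : PySem.Dict String String :=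
  if p.1 ≠ "" ∧ p.2 ≠ [] then d.insert p.1 (PySem.Str.strip (PySem.Str.join " " p.2)) else d

theorem pvB_build_eq (secs : List (String × List String)) : pvB_build secs = secs.foldl pvStep PySem.Dict.empty := rfl

theorem pvB_build_append (xs ys : List (String × List String)) :
    pvB_build (xs ++ ys) = ys.foldl pvStep (pvB_build xs) := by
  simp [pvB_build_eq, List.foldl_append]

theorem pvB_build_skip_empty (xs : List (String × List String)) (b : List String) (ys : List (String × List String)) :
    pvB_build (xs ++ ("", b) :: ys) = pvB_build (xs ++ ys) := by
  simp [pvB_build_append, List.foldl_cons, pvStep]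

-- sections skips leading non-header lines: it only depends on the post part of the span
theorem pvB_sections_span (ls : List String) : pvB_sections ls = pvB_sections (pvB_span ls).2 := by
  induction ls with
  | nil => rfl
  | cons l rest ih =>
    rw [pvB_span]
    split
    · rfl
    · rename_i h
      rw [pvB_sections]
      simp only [if_neg h]
      exact ih

-- flushing the open section: dead state flushes nothing, a live one appends its block
theorem pv_save_dead (d : PySem.Dict String String) (cur : Option String) (body : List String)
    (h : cur = none ∨ cur = some "") : pvA_save d cur body = d := by
  rcases h with rfl | rfl <;> simp [pvA_save]

theorem pv_save_live (init : List (String × List String)) (s : String) (body : List String) :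
    pvA_save (pvB_build init) (some s) body = pvB_build (init ++ [(s, body)]) := by
  rw [pvB_build_append]; rfl

def pvFin (st : PySem.Dict String String × Option String × List String) : PySem.Dict String String :=
  pvA_save st.1 st.2.1 st.2.2

-- the core correspondence: A's state machine over clean lines = B's block decomposition
theorem pv_main (ls : List String) :
    (∀ (init : List (String × List String)) (cur : Option String) body, (cur = none ∨ cur = some "") →
      pvFin (pvA_loop' ls (pvB_build init) cur body) = pvB_build (init ++ pvB_sections ls))
    ∧ (∀ (init : List (String × List String)) s body, s ≠ "" →
      pvFin (pvA_loop' ls (pvB_build init) (some s) body)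
        = pvB_build (init ++ (s, body ++ (pvB_span ls).1) :: pvB_sections (pvB_span ls).2)) := by
  induction ls with
  | nil =>
    constructor
    · rintro init cur body hdead
      simpa [pvA_loop', pvFin, pvB_sections] using pv_save_dead (pvB_build init) cur body hdead
    · intro init s body hs
      simp only [pvA_loop', pvFin, pvB_span, pvB_sections, List.append_nil]
      exact pv_save_live init s body
  | cons l rest ih =>
    obtain ⟨ih1, ih2⟩ := ih
    have helper : ∀ (nm : String) (il : List String) init,
        pvFin (pvA_loop' rest (pvB_build init) (some nm) il)
          = pvB_build (init ++ (nm, il ++ (pvB_span rest).1) :: pvB_sections (pvB_span rest).2) := by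
      intro nm il init
      by_cases hnm : nm = ""
      · subst hnm
        rw [ih1 init (some "") il (Or.inr rfl), pvB_build_skip_empty, ← pvB_sections_span]
      · exact ih2 init nm il hnm
    by_cases hc : PySem.Str.isIn ":" l = true
    · have hsec : pvB_sections (l :: rest)
          = ((if PySem.Str.startswith l "**" = true then
                PySem.Str.lower (PySem.Str.strip (PySem.Str.replace (PySem.Str.replace l "**" "") ":" ""))
              else PySem.Str.lower (PySem.Str.strip (((PySem.Str.split? l ":").getD []).headD ""))),
             (if PySem.Str.strip (((PySem.Str.splitMax? l ":" 1).getD []).getD 1 "") ≠ "" then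
                [PySem.Str.strip (((PySem.Str.splitMax? l ":" 1).getD []).getD 1 "")] else [])
               ++ (pvB_span rest).1) :: pvB_sections (pvB_span rest).2 := by
        rw [pvB_sections]; simp only [if_pos hc]
      have hspan : pvB_span (l :: rest) = ([], l :: rest) := by
        rw [pvB_span]; simp only [if_pos hc]
      constructor
      · rintro init cur body hdead
        simp only [pvA_loop', hc, Bool.or_true, if_true]
        rw [pv_save_dead (pvB_build init) cur body hdead, helper, hsec]
      · intro init s body hs
        simp only [pvA_loop', hc, Bool.or_true, if_true]
        rw [pv_save_live, helper, hspan, hsec]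
        simp [List.append_assoc]
    · have hcf : PySem.Str.isIn ":" l = false := Bool.eq_false_iff.mpr hc
      have hw : ((PySem.Str.startswith l "**" && PySem.Str.endswith l "**:") || PySem.Str.isIn ":" l) = false := by
        rcases Bool.eq_false_or_eq_true (PySem.Str.endswith l "**:") with h1 | h1
        · exact absurd (pv_endswith_isIn _ h1) hc
        · rw [h1, hcf, Bool.and_false, Bool.or_false]
      have hspan : pvB_span (l :: rest) = (l :: (pvB_span rest).1, (pvB_span rest).2) := by
        rw [pvB_span]; simp only [hcf, Bool.false_eq_true, if_false]
      have hsec : pvB_sections (l :: rest) = pvB_sections rest := by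
        rw [pvB_sections]; simp only [hcf, Bool.false_eq_true, if_false]
      constructor
      · rintro init cur body hdead
        rw [hsec]
        rcases hdead with rfl | rfl
        · simp only [pvA_loop', hw, Bool.false_eq_true, if_false]
          exact ih1 init none body (Or.inl rfl)
        · simp only [pvA_loop', hw, Bool.false_eq_true, if_false, ne_eq, not_true_eq_false, if_false]
          exact ih1 init (some "") body (Or.inr rfl)
      · intro init s body hs
        simp only [pvA_loop', hw, Bool.false_eq_true, if_false, if_pos hs]
        rw [ih2 init s (body ++ [l]) hs, hspan]
        simp [List.append_assoc]

-- matching-phase lemmas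
theorem pv_scan_aux (sl : String) (items : List (String × String)) : ∀ (a b : Option String),
    items.foldl (fun st p =>
      ((if st.1 = none ∧ p.1 = sl then some p.2 else st.1),
       (if st.2 = none ∧ (PySem.Str.isIn sl p.1 || PySem.Str.isIn p.1 sl) then some p.2 else st.2))) (a, b)
    = (a.or ((items.find? (fun p => p.1 == sl)).map (·.2)),
       b.or ((items.find? (fun p => PySem.Str.isIn sl p.1 || PySem.Str.isIn p.1 sl)).map (·.2))) := by
  induction items with
  | nil => intro a b; cases a <;> cases b <;> rfl
  | cons p rest ih =>
    intro a b
    rw [List.foldl_cons, ih]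
    have c1 : (if a = none ∧ p.1 = sl then some p.2 else a).or (((rest.find? (fun p => p.1 == sl))).map (·.2))
        = a.or ((((p :: rest).find? (fun p => p.1 == sl))).map (·.2)) := by
      cases a with
      | some x => rfl
      | none =>
        by_cases h1 : p.1 = sl
        · have hf : (p :: rest).find? (fun q => q.1 == sl) = some p :=
            List.find?_cons_of_pos (beq_iff_eq.mpr h1)
          rw [hf, if_pos ⟨rfl, h1⟩]; rfl
        · have hf : (p :: rest).find? (fun q => q.1 == sl) = rest.find? (fun q => q.1 == sl) :=
            List.find?_cons_of_neg (by simpa using h1)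
          rw [hf, if_neg (fun h => h1 h.2)]
    have c2 : (if b = none ∧ (PySem.Str.isIn sl p.1 || PySem.Str.isIn p.1 sl) then some p.2 else b).or
          (((rest.find? (fun p => PySem.Str.isIn sl p.1 || PySem.Str.isIn p.1 sl))).map (·.2))
        = b.or ((((p :: rest).find? (fun p => PySem.Str.isIn sl p.1 || PySem.Str.isIn p.1 sl))).map (·.2)) := by
      cases b with
      | some x => rfl
      | none =>
        by_cases h2 : (PySem.Str.isIn sl p.1 || PySem.Str.isIn p.1 sl) = true
        · have hf : (p :: rest).find? (fun q => PySem.Str.isIn sl q.1 || PySem.Str.isIn q.1 sl) = some p :=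
            List.find?_cons_of_pos h2
          rw [hf, if_pos ⟨rfl, h2⟩]; rfl
        · have hf : (p :: rest).find? (fun q => PySem.Str.isIn sl q.1 || PySem.Str.isIn q.1 sl)
              = rest.find? (fun q => PySem.Str.isIn sl q.1 || PySem.Str.isIn q.1 sl) :=
            List.find?_cons_of_neg (by simpa using h2)
          rw [hf, if_neg (fun h => h2 h.2)]
    simp only [Prod.mk.injEq]
    exact ⟨c1, c2⟩

theorem pv_scan_eq (sl : String) (items : List (String × String)) :
    pvB_scan items sl = (((items.find? (fun p => p.1 == sl)).map (·.2)),
      ((items.find? (fun p => PySem.Str.isIn sl p.1 || PySem.Str.isIn p.1 sl)).map (·.2))) := by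
  exact pv_scan_aux sl items none none

theorem pv_get?_eq_find? (d : PySem.Dict String String) (k : String) :
    d.get? k = (d.items.find? (fun p => p.1 == k)).map (·.2) := by
  cases d with
  | mk items =>
    induction items with
    | nil => rfl
    | cons p rest ih =>
      cases p with
      | mk pk pv =>
        rw [PySem.Dict.get?_mk_cons]
        simp only [List.find?]
        by_cases h : (pk == k) = true <;> simp [h, ih]

theorem pv_ofList_eq_foldl (pairs : List (String × String)) :
    PySem.Dict.ofList pairs = pairs.foldl (fun d p => d.insert p.1 p.2) PySem.Dict.empty := by
  simp [PySem.Dict.ofList, PySem.Dict.update]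

-- ===== VERDICT (by name: the statement is the Claim_ definition above) =====
theorem parse_skill_explanations_py_spec : Claim_equal_parse_skill_explanations_py := by
  intro explanation_text original_skills _
  unfold Spec_parse_skill_explanations_py
  unfold parse_skill_explanations_py parse_skill_explanations_py_alt
  simp only
  have hE : pvA_save (pvA_loop ((PySem.Str.split? explanation_text "\n").getD []) PySem.Dict.empty none []).1
        (pvA_loop ((PySem.Str.split? explanation_text "\n").getD []) PySem.Dict.empty none []).2.1
        (pvA_loop ((PySem.Str.split? explanation_text "\n").getD []) PySem.Dict.empty none []).2.2
      = pvB_build (pvB_sections (((((PySem.Str.split? explanation_text "\n").getD []).map PySem.Str.strip).filter (fun s => s ≠ "")))) := by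
    rw [pvA_loop_clean]
    have := (pv_main ((((PySem.Str.split? explanation_text "\n").getD []).map PySem.Str.strip).filter (fun s => s ≠ ""))).1 [] none [] (Or.inl rfl)
    simpa [pvFin, pvB_build] using this
  rw [hE, pv_ofList_eq_foldl, List.foldl_map]
  congr 1
  apply PySem.List.foldl_congr_mem
  intro m orig _
  simp only [pvB_resolve, pv_scan_eq, pv_get?_eq_find?]
  cases hx : ((pvB_build (pvB_sections (((((PySem.Str.split? explanation_text "\n").getD []).map PySem.Str.strip).filter (fun s => s ≠ ""))))).items.find? (fun p => p.1 == PySem.Str.lower orig)) with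
  | some p => simp [Option.or]
  | none =>
    simp only [Option.map_none, Option.or]
    cases hy : ((pvB_build (pvB_sections (((((PySem.Str.split? explanation_text "\n").getD []).map PySem.Str.strip).filter (fun s => s ≠ ""))))).items.find? (fun p => PySem.Str.isIn (PySem.Str.lower orig) p.1 || PySem.Str.isIn p.1 (PySem.Str.lower orig))) with
    | some p => simp
    | none => simp
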